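-- pv_equiv track=rewrite | github.com/Aliipou/SpaceWeather-iOS | backend/app/routers/solar.py | _max_flare_class
-- ===== SOURCE A (Python) =====
-- def _max_flare_class(flares: list) -> str:
--     order = {"X": 5, "M": 4, "C": 3, "B": 2, "A": 1}
--     best = "A"
--     for f in flares:
--         cls = (f.get("class") or "A")[0].upper()
--         if order.get(cls, 0) > order.get(best, 0):
--             best = cls
--     return best
-- ===== SOURCE B (Python) =====
-- def _max_flare_class(flares: list) -> str:
--     present = {(f.get("class") or "A")[0].upper() for f in flares}
--     for c in ("X", "M", "C", "B"):
--         if c in present: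
--             return c
--     return "A"
-- ===== Notes on version B (the rewrite author's own statement) =====
-- stated objective: alternative
-- what changed: Replaces A's running-max scan with a lookup dict by a two-phase algorithm: build the set of first-letter classes present, then probe the four ranked classes in descending priority and return the first hit.
import Mathlib
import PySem

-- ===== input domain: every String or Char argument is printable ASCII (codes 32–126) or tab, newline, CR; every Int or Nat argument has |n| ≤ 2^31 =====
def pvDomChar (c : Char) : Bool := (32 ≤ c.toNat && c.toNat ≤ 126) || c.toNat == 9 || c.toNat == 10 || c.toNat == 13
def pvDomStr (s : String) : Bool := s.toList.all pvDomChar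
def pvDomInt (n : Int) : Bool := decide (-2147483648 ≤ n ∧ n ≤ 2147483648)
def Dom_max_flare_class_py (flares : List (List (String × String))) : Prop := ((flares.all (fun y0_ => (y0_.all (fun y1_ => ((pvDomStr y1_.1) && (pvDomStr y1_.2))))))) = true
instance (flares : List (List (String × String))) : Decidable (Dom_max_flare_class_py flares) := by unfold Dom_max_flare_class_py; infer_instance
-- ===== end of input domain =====

-- B replaces A's running-max loop (with a rank dict) by a two-phase algorithm: build the
-- set of first-letter classes present, then probe X,M,C,B in descending priority (objective: alternative).
-- Both ports share the extraction helper pvCls = (f.get("class") or "A")[0].upper(), which B keeps on purpose.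

-- ===== PORT A =====
-- (f.get("class") or "A")[0].upper(): the `or "A"` guarantees the string indexed is nonempty,
-- so the `none` branch of pyGet? is unreachable (Python never raises here).
def pvCls (f : List (String × String)) : String :=
  let s : String := match (PySem.Dict.ofList f).get? "class" with
    | some t => if t = "" then "A" else t
    | none => "A"
  match PySem.Str.pyGet? s 0 with
  | some c => String.ofList [PySem.Chars.upperChar c]
  | none => ""

def pvOrder : PySem.Dict String Int :=
  PySem.Dict.ofList [("X", 5), ("M", 4), ("C", 3), ("B", 2), ("A", 1)]

-- the loop body of A, named (helpers stay helpers)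
def pvStep (best : String) (f : List (String × String)) : String :=
  let cls := pvCls f
  if pvOrder.getD cls 0 > pvOrder.getD best 0 then cls else best

def max_flare_class_py (flares : List (List (String × String))) : String :=
  flares.foldl pvStep "A"

-- ===== PORT B =====
def max_flare_class_py_alt (flares : List (List (String × String))) : String :=
  let present : PySem.Set String := PySem.Set.ofList (flares.map pvCls)
  (((["X", "M", "C", "B"] : List String).find? (fun c => PySem.Set.contains present c)).getD "A")

-- ===== PRECONDITION & SPEC =====
def Spec_max_flare_class_py (flares : List (List (String × String))) (out : String) : Prop := out = max_flare_class_py_alt flares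
instance (flares : List (List (String × String))) (out : String) : Decidable (Spec_max_flare_class_py flares out) := by unfold Spec_max_flare_class_py; infer_instance

-- ===== CLAIM (what is proved, stated in full; the proofs are below) =====
def Claim_equal_max_flare_class_py : Prop := ∀ (flares : List (List (String × String))), Dom_max_flare_class_py flares → Spec_max_flare_class_py flares (max_flare_class_py flares)

-- ===== LEMMAS AND PROOFS =====

-- the descending-priority probe, parameterised by the current best (proof-only helper)
def pvProbe (b : String) (cs : List String) : String :=
  if b = "X" ∨ "X" ∈ cs then "X"
  else if b = "M" ∨ "M" ∈ cs then "M"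
  else if b = "C" ∨ "C" ∈ cs then "C"
  else if b = "B" ∨ "B" ∈ cs then "B"
  else "A"

def pvRk (c : String) : Int := pvOrder.getD c 0

lemma pvRk_eq (c : String) : pvRk c =
    if c = "X" then 5 else if c = "M" then 4 else if c = "C" then 3
    else if c = "B" then 2 else if c = "A" then 1 else 0 := by
  have h : pvOrder = PySem.Dict.mk [("X", 5), ("M", 4), ("C", 3), ("B", 2), ("A", 1)] := by decide
  simp only [pvRk, h, PySem.Dict.getD_eq_get?_getD, PySem.Dict.get?_mk_cons, beq_iff_eq]
  by_cases h1 : c = "X" <;> by_cases h2 : c = "M" <;> by_cases h3 : c = "C" <;>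
    by_cases h4 : c = "B" <;> by_cases h5 : c = "A" <;>
    first
      | (subst_vars; simp)
      | simp_all [Ne.symm h1, Ne.symm h2, Ne.symm h3, Ne.symm h4, Ne.symm h5,
          PySem.Dict.get?, List.find?]

def pvOk (b : String) : Prop := b = "A" ∨ b = "B" ∨ b = "C" ∨ b = "M" ∨ b = "X"

lemma pvStep_ok {b : String} (hb : pvOk b) (f : List (String × String)) :
    pvOk (pvStep b f) := by
  simp only [pvStep]
  generalize pvCls f = c
  have hc := pvRk_eq c
  have hbb := pvRk_eq b
  simp only [pvRk] at hc hbb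
  rw [hc, hbb]
  rcases hb with rfl | rfl | rfl | rfl | rfl <;>
    by_cases hX : c = "X" <;> by_cases hM : c = "M" <;> by_cases hC : c = "C" <;>
      by_cases hB : c = "B" <;> by_cases hA : c = "A" <;>
    simp_all [pvOk]

lemma pvProbe_step {b : String} (hb : pvOk b) (f : List (String × String)) (cs : List String) :
    pvProbe (pvStep b f) cs = pvProbe b (pvCls f :: cs) := by
  simp only [pvStep]
  generalize pvCls f = c
  have hc := pvRk_eq c
  have hbb := pvRk_eq b
  simp only [pvRk] at hc hbb
  rw [hc, hbb]
  rcases hb with rfl | rfl | rfl | rfl | rfl <;>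
    by_cases hX : c = "X" <;> by_cases hM : c = "M" <;> by_cases hC : c = "C" <;>
      by_cases hB : c = "B" <;> by_cases hA : c = "A" <;>
    first
      | (subst_vars; simp_all [pvProbe]; done)
      | simp_all [pvProbe, Ne.symm hX, Ne.symm hM, Ne.symm hC, Ne.symm hB]

lemma pvLoop_eq_probe (l : List (List (String × String))) :
    ∀ (b : String), pvOk b → l.foldl pvStep b = pvProbe b (l.map pvCls) := by
  induction l with
  | nil =>
    intro b hb
    rcases hb with rfl | rfl | rfl | rfl | rfl <;> simp [pvProbe]
  | cons f l ih =>
    intro b hb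
    rw [List.foldl_cons, List.map_cons, ih _ (pvStep_ok hb f), pvProbe_step hb]

lemma pvAlt_eq_probe (flares : List (List (String × String))) :
    max_flare_class_py_alt flares = pvProbe "A" (flares.map pvCls) := by
  unfold max_flare_class_py_alt pvProbe
  have hmem : ∀ c : String, PySem.Set.contains (PySem.Set.ofList (flares.map pvCls)) c
      = decide (c ∈ flares.map pvCls) := by
    intro c
    by_cases h : c ∈ flares.map pvCls
    · simp [h]
    · simp only [h, decide_false]
      by_contra hc
      exact h ((PySem.Set.mem_ofList _ _).1 ((PySem.Set.contains_iff _ _).1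
        (by simpa using hc)))
  simp only [List.find?, hmem]
  by_cases hX : "X" ∈ flares.map pvCls <;> by_cases hM : "M" ∈ flares.map pvCls <;>
    by_cases hC : "C" ∈ flares.map pvCls <;> by_cases hB : "B" ∈ flares.map pvCls <;>
    simp [hX, hM, hC, hB]

-- ===== VERDICT (by name: the statement is the Claim_ definition above) =====
theorem max_flare_class_py_spec : Claim_equal_max_flare_class_py := by
  intro flares _
  unfold Spec_max_flare_class_py max_flare_class_py
  rw [pvAlt_eq_probe, pvLoop_eq_probe flares "A" (Or.inl rfl)]
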